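-- pv_equiv track=rewrite | github.com/JeongMyeongHong/DailyAlgorithm | 프로그래머스/0/181918. 배열 만들기 4/배열 만들기 4.py | solution
-- ===== SOURCE A (Python) =====
-- def solution(arr):
--     stk = [arr[0]]
--     for a in arr[1:]:
--         while 1:
--             if len(stk)==0:
--                 stk.append(a)
--                 break
--             if stk[-1] < a:
--                 stk.append(a)
--                 break
--             else:
--                 stk = stk[:-1]
--     return stk
-- ===== SOURCE B (Python) =====
-- def solution(arr):
--     result = [arr[-1]]
--     for a in reversed(arr[:-1]):
--         if a < result[-1]:
--             result.append(a)
--     return result[::-1]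
-- ===== Notes on version B (the rewrite author's own statement) =====
-- stated objective: faster
-- what changed: Replaces A's monotonic stack with its while-pop loop (each pop copying the stack via stk[:-1]) by a single right-to-left pass that keeps a running strict suffix minimum and appends only elements below it.
import Mathlib
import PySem

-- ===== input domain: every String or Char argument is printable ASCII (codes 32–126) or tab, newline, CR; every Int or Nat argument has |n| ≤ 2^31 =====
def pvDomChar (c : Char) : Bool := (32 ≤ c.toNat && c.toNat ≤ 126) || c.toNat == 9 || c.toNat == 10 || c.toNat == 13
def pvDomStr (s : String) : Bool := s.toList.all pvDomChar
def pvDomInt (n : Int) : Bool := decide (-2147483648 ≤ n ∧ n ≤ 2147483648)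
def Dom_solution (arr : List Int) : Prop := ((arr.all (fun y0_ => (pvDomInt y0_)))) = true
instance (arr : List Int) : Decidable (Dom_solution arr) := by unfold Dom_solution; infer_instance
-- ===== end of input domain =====

-- B replaces A's monotonic stack (with its quadratic slice-copy pop loop) by a single
-- right-to-left pass keeping the strict suffix minima; return value only, A mutates nothing.

-- ===== PORT A =====
-- the inner `while 1` pop loop of A: pop (stk = stk[:-1]) until empty or stk[-1] < a, then append a
def popLoop (stk : List Int) (a : Int) : List Int :=
  if h : stk = [] then [a]
  else if stk.getLast! < a then stk ++ [a]
  else popLoop stk.dropLast a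
termination_by stk.length
decreasing_by
  have hlen : 0 < stk.length := List.length_pos_iff.mpr h
  simp only [List.length_dropLast]
  omega

def solution (arr : List Int) : List Int :=
  match arr with
  | [] => []          -- arr[0] raises IndexError in Python; excluded by Pre_solution
  | x :: rest => rest.foldl popLoop [x]

-- ===== PORT B =====
def solution_alt (arr : List Int) : List Int :=
  match arr.getLast? with
  | none => []        -- arr[-1] raises IndexError in Python; excluded by Pre_solution
  | some lastv =>
    ((arr.dropLast.reverse).foldl
      (fun res a => if a < res.getLast! then res ++ [a] else res) [lastv]).reverse

-- ===== PRECONDITION & SPEC =====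
-- Pre_ excludes only the empty list, on which both Pythons raise IndexError (arr[0] / arr[-1]).
def Pre_solution (arr : List Int) : Prop := arr ≠ []
instance (arr : List Int) : Decidable (Pre_solution arr) := by unfold Pre_solution; infer_instance

def pvWitness_solution : List Int := [3, 1, 2]

def Spec_solution (arr : List Int) (out : List Int) : Prop := out = solution_alt arr
instance (arr : List Int) (out : List Int) : Decidable (Spec_solution arr out) := by unfold Spec_solution; infer_instance

-- ===== CLAIM (what is proved, stated in full; the proofs are below) =====
def Claim_equal_solution : Prop := ∀ (arr : List Int), Dom_solution arr → Pre_solution arr → Spec_solution arr (solution arr)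

-- ===== LEMMAS AND PROOFS =====

-- the common characterisation: strict suffix minima, built right to left
def ssmStep (a : Int) (acc : List Int) : List Int :=
  match acc with
  | [] => [a]
  | h :: t => if a < h then a :: h :: t else h :: t

def ssm : List Int → List Int
  | [] => []
  | x :: xs => ssmStep x (ssm xs)

theorem ssm_pairwise (p : List Int) : (ssm p).Pairwise (· < ·) := by
  induction p with
  | nil => simp [ssm]
  | cons x xs ih =>
    rw [ssm]
    cases h : ssm xs with
    | nil => simp [ssmStep]
    | cons h0 t =>
      rw [h] at ih
      simp only [ssmStep]
      split_ifs with hx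
      · exact ih.cons (by
          intro y hy
          rcases List.mem_cons.mp hy with rfl | hy
          · exact hx
          · exact lt_trans hx (List.rel_of_pairwise_cons ih hy))
      · exact ih

theorem filter_nil_of_head_ge (h0 : Int) (t : List Int) (a : Int)
    (hp : (h0 :: t).Pairwise (· < ·)) (ha : ¬ h0 < a) :
    (h0 :: t).filter (fun y => y < a) = [] := by
  simp only [List.filter_cons, decide_eq_true_eq]
  rw [if_neg ha]
  apply List.filter_eq_nil_iff.mpr
  intro y hy
  simp only [decide_eq_true_eq]
  have := List.rel_of_pairwise_cons hp hy
  omega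

theorem ssm_append (p : List Int) (a : Int) :
    ssm (p ++ [a]) = (ssm p).filter (fun y => y < a) ++ [a] := by
  induction p with
  | nil => simp [ssm, ssmStep]
  | cons x xs ih =>
    have hp := ssm_pairwise xs
    simp only [List.cons_append, ssm, ih]
    cases h : ssm xs with
    | nil =>
      simp only [h, List.filter_nil, List.nil_append, ssmStep, List.filter_cons,
        decide_eq_true_eq]
      split_ifs with h1 <;> simp
    | cons h0 t =>
      rw [h] at hp
      by_cases hha : h0 < a
      · have hfil : (h0 :: t).filter (fun y => y < a) = h0 :: t.filter (fun y => y < a) := by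
          simp [List.filter_cons, hha]
        rw [hfil]
        simp only [ssmStep, List.cons_append]
        split_ifs with hx
        · have hxa : x < a := lt_trans hx hha
          simp [List.filter_cons, hx, hxa, hfil]
        · simp [List.filter_cons, hx, hfil]
      · have hfil := filter_nil_of_head_ge h0 t a hp hha
        rw [hfil, List.nil_append]
        simp only [ssmStep]
        by_cases hxh : x < h0
        · by_cases hxa : x < a
          · simp [List.filter_cons, hxh, hxa, hfil]
          · simp [List.filter_cons, hxh, hxa, hfil]
        · have hxa : ¬ x < a := by omega
          simp [List.filter_cons, hxh, hxa, hfil]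

-- A's pop loop on a strictly increasing stack keeps exactly the elements < a, then pushes a
theorem popLoop_eq (a : Int) (stk : List Int) (hp : stk.Pairwise (· < ·)) :
    popLoop stk a = stk.filter (fun y => y < a) ++ [a] := by
  induction stk using List.reverseRecOn with
  | nil => rw [popLoop.eq_def]; simp
  | append_singleton ys y ih =>
    rw [popLoop.eq_def]
    have hne : ys ++ [y] ≠ [] := by simp
    rw [dif_neg hne]
    have hlast : (ys ++ [y]).getLast! = y := by
      simp [List.getLast!_eq_getLast?_getD]
    rw [hlast]
    have hys : ∀ z ∈ ys, z < y := by
      intro z hz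
      have := (List.pairwise_append.mp hp).2.2
      exact this z hz y (by simp)
    split_ifs with hy
    · have : (ys ++ [y]).filter (fun z => z < a) = ys ++ [y] := by
        apply List.filter_eq_self.mpr
        intro z hz
        simp only [decide_eq_true_eq]
        rcases List.mem_append.mp hz with hz | hz
        · exact lt_trans (hys z hz) hy
        · simp at hz; omega
      rw [this]
    · rw [List.dropLast_concat]
      rw [ih ((List.pairwise_append.mp hp).1)]
      have : (ys ++ [y]).filter (fun z => z < a) = ys.filter (fun z => z < a) := by
        simp [List.filter_append, List.filter_cons, hy]
      rw [this]

-- A's whole fold computes the strict suffix minima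
theorem foldl_popLoop_eq (rest : List Int) (x : Int) :
    rest.foldl popLoop [x] = ssm (x :: rest) := by
  induction rest using List.reverseRecOn with
  | nil => simp [ssm, ssmStep]
  | append_singleton r a ih =>
    rw [List.foldl_append, List.foldl_cons, List.foldl_nil, ih,
      popLoop_eq a _ (ssm_pairwise (x :: r))]
    have : x :: (r ++ [a]) = (x :: r) ++ [a] := by simp
    rw [this, ssm_append]

-- B's left fold, whose state is the reverse of ssmStep's accumulator
theorem foldl_rev_eq (l : List Int) (h : Int) (t : List Int) :
    (l.foldl (fun res a => if a < res.getLast! then res ++ [a] else res)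
      ((h :: t).reverse)).reverse = l.foldl (fun acc a => ssmStep a acc) (h :: t) := by
  induction l generalizing h t with
  | nil => simp
  | cons a l ih =>
    simp only [List.foldl_cons]
    have hlast : ((h :: t).reverse).getLast! = h := by
      simp [List.getLast!_eq_getLast?_getD, List.getLast?_reverse]
    rw [hlast]
    by_cases ha : a < h
    · rw [if_pos ha]
      have : (h :: t).reverse ++ [a] = (a :: h :: t).reverse := by simp
      rw [this, ih a (h :: t)]
      simp [ssmStep, ha]
    · rw [if_neg ha, ih h t]
      simp [ssmStep, ha]

-- B's fold over the reversed prefix is ssm of the whole list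
theorem foldl_ssmStep_eq (p : List Int) (z : Int) :
    (p.reverse).foldl (fun acc a => ssmStep a acc) [z] = ssm (p ++ [z]) := by
  rw [List.foldl_reverse]
  induction p with
  | nil => simp [ssm, ssmStep]
  | cons x xs ih => simp only [List.foldr_cons, ih, List.cons_append, ssm]

theorem solution_alt_eq_ssm (arr : List Int) (hne : arr ≠ []) :
    solution_alt arr = ssm arr := by
  have hl : arr.getLast? = some (arr.getLast hne) := List.getLast?_eq_some_getLast hne
  unfold solution_alt
  rw [hl]
  show (List.foldl (fun res a => if a < res.getLast! then res ++ [a] else res)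
      [arr.getLast hne] arr.dropLast.reverse).reverse = ssm arr
  have h1 : ([arr.getLast hne] : List Int) = ([arr.getLast hne] : List Int).reverse := by simp
  conv_lhs => rw [h1]
  rw [foldl_rev_eq, foldl_ssmStep_eq, List.dropLast_concat_getLast hne]

-- ===== VERDICT (by name: the statement is the Claim_ definition above) =====
theorem solution_spec : Claim_equal_solution := by
  intro arr _ hpre
  unfold Spec_solution
  rw [solution_alt_eq_ssm arr hpre]
  match arr with
  | [] => exact absurd rfl hpre
  | x :: rest => exact foldl_popLoop_eq rest x
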